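-- pv_equiv track=rewrite | github.com/sebastienhourdin/fil_rouge | multi_agent/genetic_algorithm/utils/flattenSolution.py | rebuildFlattenSolution
-- ===== SOURCE A (Python) =====
-- def rebuildFlattenSolution(flattenSol):
--     trucks = []
--     truck = [0]
--     for elem in flattenSol[1:]:  # Exclude start zero
--         if elem == 0:
--             truck.append(0)
--             trucks.append(truck)
--             truck = [0]
--         else:
--             truck.append(elem)
--     return trucks
-- ===== SOURCE B (Python) =====
-- def rebuildFlattenSolution(flattenSol):
--     # Repeatedly cut the route at the next depot delimiter: each truck is the
--     # delimiter-free chunk before the next 0, bookended by depot stops.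
--     trucks = []
--     seq = flattenSol[1:]
--     while 0 in seq:
--         i = seq.index(0)
--         trucks.append([0] + seq[:i] + [0])
--         seq = seq[i + 1:]
--     return trucks
-- ===== Notes on version B (the rewrite author's own statement) =====
-- stated objective: alternative
-- what changed: Replaces A's element-by-element streaming accumulator (open truck flushed at each zero) by repeated find-next-delimiter-and-slice: while a 0 remains, cut the chunk before it into a depot-bookended truck and continue on the remainder.
import Mathlib
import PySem

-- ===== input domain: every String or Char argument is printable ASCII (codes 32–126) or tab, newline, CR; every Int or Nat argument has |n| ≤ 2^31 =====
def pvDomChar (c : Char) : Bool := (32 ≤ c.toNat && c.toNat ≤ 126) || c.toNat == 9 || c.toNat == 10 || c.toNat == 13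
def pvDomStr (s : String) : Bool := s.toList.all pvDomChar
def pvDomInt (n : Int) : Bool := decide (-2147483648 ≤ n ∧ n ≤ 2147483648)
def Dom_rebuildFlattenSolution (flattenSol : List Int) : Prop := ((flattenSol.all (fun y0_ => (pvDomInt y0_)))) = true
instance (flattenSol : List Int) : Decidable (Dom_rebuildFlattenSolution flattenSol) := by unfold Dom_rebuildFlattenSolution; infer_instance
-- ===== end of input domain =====

-- B: same split-at-zero-delimiters result by repeated find-next-delimiter-and-slice instead of A's streaming accumulator (alternative decomposition).

-- ===== PORT A =====
-- A's loop body: state = (trucks, truck)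
def stepA (st : List (List Int) × List Int) (elem : Int) : List (List Int) × List Int :=
  if elem = 0 then (st.1 ++ [st.2 ++ [0]], [0])
  else (st.1, st.2 ++ [elem])

def rebuildFlattenSolution (flattenSol : List Int) : List (List Int) :=
  ((PySem.List.slice flattenSol (some 1) none).foldl stepA ([], [0])).1

-- ===== PORT B =====
-- B's while loop: while 0 in seq, cut at seq.index(0)
def bLoop (seq : List Int) (trucks : List (List Int)) : List (List Int) :=
  if h : (0 : Int) ∈ seq then
    -- seq.index(0); getD 0 is a totality guard: index? is some here since 0 ∈ seq
    let i : Nat := (PySem.List.index? seq (0 : Int)).getD 0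
    bLoop (PySem.List.slice seq (some ((i : Int) + 1)) none)
      (trucks ++ [[0] ++ PySem.List.slice seq none (some (i : Int)) ++ [0]])
  else trucks
termination_by seq.length
decreasing_by
  have hne : seq ≠ [] := by rintro rfl; simp at h
  have : ((i : Int) + 1) = ((i + 1 : Nat) : Int) := by push_cast; ring
  rw [this, PySem.List.slice_from_natCast]
  have hpos : 0 < seq.length := List.length_pos_iff.mpr hne
  simp [List.length_drop]
  omega

def rebuildFlattenSolution_alt (flattenSol : List Int) : List (List Int) :=
  bLoop (PySem.List.slice flattenSol (some 1) none) []

-- ===== PRECONDITION & SPEC =====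
def Spec_rebuildFlattenSolution (flattenSol : List Int) (out : List (List Int)) : Prop := out = rebuildFlattenSolution_alt flattenSol
instance (flattenSol : List Int) (out : List (List Int)) : Decidable (Spec_rebuildFlattenSolution flattenSol out) := by unfold Spec_rebuildFlattenSolution; infer_instance

-- ===== CLAIM (what is proved, stated in full; the proofs are below) =====
def Claim_equal_rebuildFlattenSolution : Prop := ∀ (flattenSol : List Int), Dom_rebuildFlattenSolution flattenSol → Spec_rebuildFlattenSolution flattenSol (rebuildFlattenSolution flattenSol)

-- ===== LEMMAS AND PROOFS =====

-- reference split function: trucks of t, given the segment collected so far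
def fA : List Int → List Int → List (List Int)
  | [], _ => []
  | x :: t, seg => if x = 0 then ([0] ++ seg ++ [0]) :: fA t [] else fA t (seg ++ [x])

theorem foldl_stepA_eq_fA (t : List Int) : ∀ (acc : List (List Int)) (seg : List Int),
    (t.foldl stepA (acc, [0] ++ seg)).1 = acc ++ fA t seg := by
  induction t with
  | nil => intro acc seg; simp [fA]
  | cons x t ih =>
    intro acc seg
    by_cases hx : x = 0
    · simp [fA, hx, stepA]
      have := ih (acc ++ [[0] ++ seg ++ [0]]) []
      simpa using this
    · have h1 : [0] ++ seg ++ [x] = [0] ++ (seg ++ [x]) := by simp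
      simp only [List.foldl_cons, stepA, if_neg hx, fA]
      rw [h1]
      exact ih acc (seg ++ [x])

theorem fA_no_zero (t : List Int) (h : (0 : Int) ∉ t) : ∀ seg, fA t seg = [] := by
  induction t with
  | nil => intro seg; rfl
  | cons x r ih =>
    intro seg
    have hx : x ≠ 0 := by rintro rfl; exact h (List.mem_cons_self)
    simp only [fA, if_neg hx]
    exact ih (fun hm => h (List.mem_cons_of_mem _ hm)) _

theorem fA_prefix (pre : List Int) : ∀ (rest seg : List Int), (0 : Int) ∉ pre →
    fA (pre ++ rest) seg = fA rest (seg ++ pre) := by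
  induction pre with
  | nil => intro rest seg _; simp
  | cons x p ih =>
    intro rest seg h
    have hx : x ≠ 0 := by rintro rfl; exact h (List.mem_cons_self)
    simp only [List.cons_append, fA, if_neg hx]
    rw [ih rest (seg ++ [x]) (fun hm => h (List.mem_cons_of_mem _ hm))]
    simp

theorem bLoop_eq_fA : ∀ (n : Nat) (t : List Int) (trucks : List (List Int)),
    t.length ≤ n → bLoop t trucks = trucks ++ fA t [] := by
  intro n
  induction n with
  | zero =>
    intro t trucks hlen
    have : t = [] := List.eq_nil_of_length_eq_zero (Nat.le_zero.mp hlen)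
    subst this
    rw [bLoop]
    simp [fA]
  | succ n ih =>
    intro t trucks hlen
    rw [bLoop]
    by_cases hm : (0 : Int) ∈ t
    · simp only [dif_pos hm]
      have hsome : (PySem.List.index? t (0 : Int)).isSome := by
        rw [PySem.List.index?_isSome_iff]; exact hm
      obtain ⟨i, hi⟩ := Option.isSome_iff_exists.mp hsome
      obtain ⟨pre, suf, ht, hpl, hpre⟩ := (PySem.List.index?_eq_some_iff t 0 i).mp hi
      have hcast : ((i : Int) + 1) = ((i + 1 : Nat) : Int) := by push_cast; ring
      simp only [hi, Option.getD_some, hcast, PySem.List.slice_from_natCast, PySem.List.slice_to_natCast]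
      subst ht
      have htake : (pre ++ 0 :: suf).take i = pre := by
        rw [← hpl]; simp
      have hdrop : (pre ++ 0 :: suf).drop (i + 1) = suf := by
        rw [← hpl, List.drop_append]
        simp
      rw [htake, hdrop]
      have hsl : suf.length ≤ n := by
        have := hlen
        simp only [List.length_append, List.length_cons] at this
        omega
      rw [ih suf _ hsl]
      rw [fA_prefix pre (0 :: suf) [] hpre]
      simp [fA]
    · simp only [dif_neg hm]
      rw [fA_no_zero t hm]
      simp

-- ===== VERDICT (by name: the statement is the Claim_ definition above) =====
theorem rebuildFlattenSolution_spec : Claim_equal_rebuildFlattenSolution := by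
  intro fl _
  unfold Spec_rebuildFlattenSolution rebuildFlattenSolution rebuildFlattenSolution_alt
  set t := PySem.List.slice fl (some 1) none with ht
  have hA : (t.foldl stepA ([], [0])).1 = fA t [] := by
    simpa using foldl_stepA_eq_fA t [] []
  rw [hA, bLoop_eq_fA t.length t [] le_rfl]
  simp
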